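-- pv_equiv track=rewrite | github.com/ChaissonLab/danbing-tk | pyVNTR/vntrutils.py | string2CaKmer
-- ===== SOURCE A (Python) =====
-- base = {'A':0, 'C':1,  'G':2,  'T':3}
--
-- byteRC = [
--  255, 191, 127,  63, 239, 175, 111,  47, 223, 159,
--   95,  31, 207, 143,  79,  15, 251, 187, 123,  59,
--  235, 171, 107,  43, 219, 155,  91,  27, 203, 139,
--   75,  11, 247, 183, 119,  55, 231, 167, 103,  39,
--  215, 151,  87,  23, 199, 135,  71,   7, 243, 179,
--  115,  51, 227, 163,  99,  35, 211, 147,  83,  19,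
--  195, 131,  67,   3, 254, 190, 126,  62, 238, 174,
--  110,  46, 222, 158,  94,  30, 206, 142,  78,  14,
--  250, 186, 122,  58, 234, 170, 106,  42, 218, 154,
--   90,  26, 202, 138,  74,  10, 246, 182, 118,  54,
--  230, 166, 102,  38, 214, 150,  86,  22, 198, 134,
--   70,   6, 242, 178, 114,  50, 226, 162,  98,  34,
--  210, 146,  82,  18, 194, 130,  66,   2, 253, 189,
--  125,  61, 237, 173, 109,  45, 221, 157,  93,  29,
--  205, 141,  77,  13, 249, 185, 121,  57, 233, 169,
--  105,  41, 217, 153,  89,  25, 201, 137,  73,   9,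
--  245, 181, 117,  53, 229, 165, 101,  37, 213, 149,
--   85,  21, 197, 133,  69,   5, 241, 177, 113,  49,
--  225, 161,  97,  33, 209, 145,  81,  17, 193, 129,
--   65,   1, 252, 188, 124,  60, 236, 172, 108,  44,
--  220, 156,  92,  28, 204, 140,  76,  12, 248, 184,
--  120,  56, 232, 168, 104,  40, 216, 152,  88,  24,
--  200, 136,  72,   8, 244, 180, 116,  52, 228, 164,
--  100,  36, 212, 148,  84,  20, 196, 132,  68,   4,
--  240, 176, 112,  48, 224, 160,  96,  32, 208, 144,
--   80,  16, 192, 128,  64,   0]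
--
-- def encodeString(string):
--     numericString = 0
--     for i in range(len(string)):
--         numericString = (numericString << 2) + base[string[i]]
--
--     return numericString
--
-- def string2CaKmer(string):
--     k = len(string)
--     for i in range(k):
--         if base[string[i]] > 3 - base[string[(k - i - 1)]]:
--             return encodeString(string)
--         if base[string[i]] < 3 - base[string[(k - i - 1)]]:
--             return getRCkmer(encodeString(string), k)
--
--     return encodeString(string)
--
-- def getRCkmer(kmer, k):
--     rckmer = 0
--     while k >= 4:
--         rckmer <<= 8
--         rckmer += byteRC[kmer & 0xff]
--         kmer >>= 8
--         k -= 4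
--     if k > 0:
--         rckmer <<= (k<<1)
--         rckmer += (byteRC[kmer] >> ((4-k)<<1))
--     return rckmer
-- ===== SOURCE B (Python) =====
-- base = {'A':0, 'C':1,  'G':2,  'T':3}
--
-- def string2CaKmer(string):
--     # One pass: build the forward encoding f (MSB-first) and the
--     # reverse-complement encoding r (LSB-first, complemented digits)
--     # simultaneously; the table-driven getRCkmer and the comparison loop
--     # disappear.  Forward wins ties, so return max(f, r).
--     f = 0
--     r = 0
--     shift = 0
--     for c in string:
--         v = base[c]
--         f = (f << 2) + v
--         r = r + ((3 - v) << shift)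
--         shift += 2
--     return f if f >= r else r
-- ===== Notes on version B (the rewrite author's own statement) =====
-- stated objective: simpler
-- what changed: B replaces A's index-mirrored character comparison loop plus the 256-entry byteRC table walk with one pass that builds the forward encoding (MSB-first) and the reverse-complement encoding (complemented digits accumulated LSB-first) simultaneously and returns the larger integer, since digit-wise lexicographic comparison of equal-length base-4 encodings is exactly integer comparison and A returns the forward encoding on ties.
import Mathlib
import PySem

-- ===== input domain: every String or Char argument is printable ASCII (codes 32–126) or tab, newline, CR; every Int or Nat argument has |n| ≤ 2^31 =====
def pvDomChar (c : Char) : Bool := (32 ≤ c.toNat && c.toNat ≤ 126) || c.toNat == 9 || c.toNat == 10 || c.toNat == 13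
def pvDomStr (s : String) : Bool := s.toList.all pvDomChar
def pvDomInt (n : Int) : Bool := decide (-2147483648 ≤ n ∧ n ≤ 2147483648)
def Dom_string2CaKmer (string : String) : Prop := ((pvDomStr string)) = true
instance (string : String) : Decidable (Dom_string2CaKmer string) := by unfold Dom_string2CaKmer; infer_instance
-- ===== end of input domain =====

-- B replaces A's mirrored character-comparison loop and the byteRC table walk by one pass that
-- builds both encodings simultaneously and returns the larger integer; objective: simpler.

-- ===== PORT A =====
-- base[c]; the default 0 is unreachable under Pre_ (Python raises KeyError on other keys)
def baseC (c : Char) : Int :=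
  match c with
  | 'A' => 0 | 'C' => 1 | 'G' => 2 | 'T' => 3 | _ => 0

def byteRCList : List Int := [255, 191, 127, 63, 239, 175, 111, 47, 223, 159, 95, 31, 207, 143, 79, 15,
  251, 187, 123, 59, 235, 171, 107, 43, 219, 155, 91, 27, 203, 139, 75, 11,
  247, 183, 119, 55, 231, 167, 103, 39, 215, 151, 87, 23, 199, 135, 71, 7,
  243, 179, 115, 51, 227, 163, 99, 35, 211, 147, 83, 19, 195, 131, 67, 3,
  254, 190, 126, 62, 238, 174, 110, 46, 222, 158, 94, 30, 206, 142, 78, 14,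
  250, 186, 122, 58, 234, 170, 106, 42, 218, 154, 90, 26, 202, 138, 74, 10,
  246, 182, 118, 54, 230, 166, 102, 38, 214, 150, 86, 22, 198, 134, 70, 6,
  242, 178, 114, 50, 226, 162, 98, 34, 210, 146, 82, 18, 194, 130, 66, 2,
  253, 189, 125, 61, 237, 173, 109, 45, 221, 157, 93, 29, 205, 141, 77, 13,
  249, 185, 121, 57, 233, 169, 105, 41, 217, 153, 89, 25, 201, 137, 73, 9,
  245, 181, 117, 53, 229, 165, 101, 37, 213, 149, 85, 21, 197, 133, 69, 5,
  241, 177, 113, 49, 225, 161, 97, 33, 209, 145, 81, 17, 193, 129, 65, 1,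
  252, 188, 124, 60, 236, 172, 108, 44, 220, 156, 92, 28, 204, 140, 76, 12,
  248, 184, 120, 56, 232, 168, 104, 40, 216, 152, 88, 24, 200, 136, 72, 8,
  244, 180, 116, 52, 228, 164, 100, 36, 212, 148, 84, 20, 196, 132, 68, 4,
  240, 176, 112, 48, 224, 160, 96, 32, 208, 144, 80, 16, 192, 128, 64, 0]

-- byteRC[n]; exact for 0 ≤ n < 256, the only indices reached under Pre_
def byteRCfn (n : Int) : Int := byteRCList.getD n.toNat 0

-- encodeString: 'num = (num << 2) + base[string[i]]' over the chars; << 2 on an int is exactly *4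
def encL (l : List Char) : Int := l.foldl (fun a c => a * 4 + baseC c) 0

-- getRCkmer's while loop; 'kmer & 0xff' = mod 256 and 'kmer >>= 8' = floordiv 256 (exact for
-- every Python int), 'rckmer <<= m' = * 2^m (exact, m ≥ 0 here)
def getRCgo (rckmer kmer k : Int) : Int :=
  if k ≥ 4 then
    getRCgo (rckmer * 256 + byteRCfn (PySem.Int.mod kmer 256)) (PySem.Int.floordiv kmer 256) (k - 4)
  else if k > 0 then
    rckmer * 2 ^ (2 * k).toNat + PySem.Int.floordiv (byteRCfn kmer) (2 ^ ((4 - k) * 2).toNat)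
  else rckmer
termination_by k.toNat
decreasing_by omega

def getRCkmer (kmer k : Int) : Int := getRCgo 0 kmer k

-- A's comparison loop 'for i in range(k)'; the getD default is never read (i < k, k-i-1 < k)
def caLoop (l : List Char) (k i : Nat) : Int :=
  if i < k then
    if baseC (l.getD i 'A') > 3 - baseC (l.getD (k - i - 1) 'A') then encL l
    else if baseC (l.getD i 'A') < 3 - baseC (l.getD (k - i - 1) 'A') then getRCkmer (encL l) (k : Int)
    else caLoop l k (i + 1)
  else encL l
termination_by k - i

def string2CaKmer (string : String) : Int :=
  caLoop string.toList string.toList.length 0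

-- ===== PORT B =====
-- B's own base lookup (if-chain; the final branch is unreachable under Pre_)
def baseB (c : Char) : Int :=
  if c == 'A' then 0 else if c == 'C' then 1 else if c == 'G' then 2 else 3

-- Source B's single loop: state (f, r, shift); 'x << s' = x * 2^s (s ≥ 0 here)
def altGo : List Char → Int → Int → Int → Int × Int
  | [], f, r, _ => (f, r)
  | c :: t, f, r, shift =>
      altGo t (f * 4 + baseB c) (r + (3 - baseB c) * 2 ^ shift.toNat) (shift + 2)

def string2CaKmer_alt (string : String) : Int :=
  let p := altGo string.toList 0 0 0
  if p.1 ≥ p.2 then p.1 else p.2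

-- ===== PRECONDITION & SPEC =====
-- Pre_ excludes strings containing a character other than A/C/G/T: on those Python A raises
-- KeyError (base[...] in the loop or in encodeString), returning no value.
def Pre_string2CaKmer (string : String) : Prop :=
  (string.toList.all (fun c => c == 'A' || c == 'C' || c == 'G' || c == 'T')) = true
instance (string : String) : Decidable (Pre_string2CaKmer string) := by
  unfold Pre_string2CaKmer; infer_instance

def pvWitness_string2CaKmer : String := "ACGT"

def Spec_string2CaKmer (string : String) (out : Int) : Prop := out = string2CaKmer_alt string
instance (string : String) (out : Int) : Decidable (Spec_string2CaKmer string out) := by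
  unfold Spec_string2CaKmer; infer_instance

-- ===== CLAIM (what is proved, stated in full; the proofs are below) =====
def Claim_equal_string2CaKmer : Prop := ∀ (string : String), Dom_string2CaKmer string → Pre_string2CaKmer string → Spec_string2CaKmer string (string2CaKmer string)

-- ===== LEMMAS AND PROOFS =====

-- valid characters
def validL (l : List Char) : Prop := ∀ c ∈ l, c ∈ (['A', 'C', 'G', 'T'] : List Char)

-- complement character and reverse-complement list
def compC (c : Char) : Char :=
  match c with
  | 'A' => 'T' | 'C' => 'G' | 'G' => 'C' | 'T' => 'A' | _ => c

def rcl (l : List Char) : List Char := (l.map compC).reverse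

theorem baseC_bounds {c : Char} (h : c ∈ (['A','C','G','T'] : List Char)) :
    0 ≤ baseC c ∧ baseC c < 4 := by
  simp only [List.mem_cons, List.not_mem_nil, or_false] at h
  rcases h with rfl | rfl | rfl | rfl <;> decide

theorem baseB_eq_baseC {c : Char} (h : c ∈ (['A','C','G','T'] : List Char)) :
    baseB c = baseC c := by
  simp only [List.mem_cons, List.not_mem_nil, or_false] at h
  rcases h with rfl | rfl | rfl | rfl <;> decide

theorem baseC_comp {c : Char} (h : c ∈ (['A','C','G','T'] : List Char)) :
    baseC (compC c) = 3 - baseC c := by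
  simp only [List.mem_cons, List.not_mem_nil, or_false] at h
  rcases h with rfl | rfl | rfl | rfl <;> decide

theorem encL_init (ys : List Char) : ∀ a : Int,
    ys.foldl (fun a c => a * 4 + baseC c) a = a * 4 ^ ys.length + encL ys := by
  induction ys with
  | nil => intro a; simp [encL]
  | cons c ys ih =>
    intro a
    have h1 : encL (c :: ys) = baseC c * 4 ^ ys.length + encL ys := by
      simpa [encL] using ih (baseC c)
    simp only [List.foldl_cons, List.length_cons, h1, ih (a * 4 + baseC c)]
    ring

theorem encL_cons (c : Char) (l : List Char) :
    encL (c :: l) = baseC c * 4 ^ l.length + encL l := by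
  simpa [encL] using encL_init l (baseC c)

theorem encL_append (xs ys : List Char) :
    encL (xs ++ ys) = encL xs * 4 ^ ys.length + encL ys := by
  simp only [encL, List.foldl_append]
  exact encL_init ys _

theorem encL_nonneg {l : List Char} (h : validL l) : 0 ≤ encL l := by
  induction l with
  | nil => simp [encL]
  | cons c l ih =>
    have hc := (baseC_bounds (h c (List.mem_cons_self ..))).1
    have ih' := ih (fun x hx => h x (List.mem_cons_of_mem _ hx))
    rw [encL_cons]
    positivity

theorem encL_lt {l : List Char} (h : validL l) : encL l < 4 ^ l.length := by
  induction l with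
  | nil => simp [encL]
  | cons c l ih =>
    have hc := (baseC_bounds (h c (List.mem_cons_self ..))).2
    have ih' := ih (fun x hx => h x (List.mem_cons_of_mem _ hx))
    rw [encL_cons, List.length_cons]
    have hp : (0:Int) < 4 ^ l.length := by positivity
    calc baseC c * 4 ^ l.length + encL l < baseC c * 4 ^ l.length + 4 ^ l.length := by omega
      _ = (baseC c + 1) * 4 ^ l.length := by ring
      _ ≤ 4 * 4 ^ l.length := by nlinarith
      _ = 4 ^ (l.length + 1) := by ring

theorem rcl_append (xs ys : List Char) : rcl (xs ++ ys) = rcl ys ++ rcl xs := by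
  simp [rcl]

-- arithmetic reverse complement of a byte
def crc4 (x : Int) : Int :=
  (3 - x % 4) * 64 + (3 - (x / 4) % 4) * 16 + (3 - (x / 16) % 4) * 4 + (3 - x / 64)

set_option maxRecDepth 4000 in
theorem byteRC_eq_crc4 : ∀ i : Fin 256, byteRCfn (i : Int) = crc4 (i : Int) := by
  decide

theorem byteRCfn_eq_crc4 {x : Int} (h0 : 0 ≤ x) (h1 : x < 256) : byteRCfn x = crc4 x := by
  have := byteRC_eq_crc4 ⟨x.toNat, by omega⟩
  simpa [Int.toNat_of_nonneg h0] using this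

theorem validL_append_left {xs ys : List Char} (h : validL (xs ++ ys)) : validL xs :=
  fun c hc => h c (List.mem_append_left _ hc)

theorem validL_append_right {xs ys : List Char} (h : validL (xs ++ ys)) : validL ys :=
  fun c hc => h c (List.mem_append_right _ hc)

-- reverse complement of a 4-mer via the byte table's arithmetic
theorem rcl_length (l : List Char) : (rcl l).length = l.length := by simp [rcl]

theorem crc4_enc4 {t : List Char} (hv : validL t) (hl : t.length = 4) :
    crc4 (encL t) = encL (rcl t) := by
  rcases t with _ | ⟨c1, _ | ⟨c2, _ | ⟨c3, _ | ⟨c4, _ | ⟨c5, t⟩⟩⟩⟩⟩ <;> simp_all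
  have h1 := baseC_bounds (hv c1 (by simp))
  have h2 := baseC_bounds (hv c2 (by simp))
  have h3 := baseC_bounds (hv c3 (by simp))
  have h4 := baseC_bounds (hv c4 (by simp))
  have e1 := baseC_comp (hv c1 (by simp))
  have e2 := baseC_comp (hv c2 (by simp))
  have e3 := baseC_comp (hv c3 (by simp))
  have e4 := baseC_comp (hv c4 (by simp))
  have hrc : rcl [c1, c2, c3, c4] = [compC c4, compC c3, compC c2, compC c1] := by simp [rcl]
  rw [hrc]
  simp only [encL, List.foldl, crc4, e1, e2, e3, e4]
  omega

theorem getRCgo_spec (n : Nat) : ∀ l : List Char, l.length = n → validL l → ∀ r : Int,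
    getRCgo r (encL l) (n : Int) = r * 4 ^ n + encL (rcl l) := by
  induction n using Nat.strong_induction_on with
  | _ n ih =>
    intro l hl hv r
    by_cases hn : 4 ≤ n
    · -- peel off the last 4 characters = the low byte of the encoding
      have hsplit : l = l.take (n - 4) ++ l.drop (n - 4) := (List.take_append_drop _ _).symm
      have hpl : (l.take (n - 4)).length = n - 4 := by rw [List.length_take, hl]; omega
      have htl : (l.drop (n - 4)).length = 4 := by rw [List.length_drop, hl]; omega
      have hvp : validL (l.take (n - 4)) := by rw [hsplit] at hv; exact validL_append_left hv
      have hvt : validL (l.drop (n - 4)) := by rw [hsplit] at hv; exact validL_append_right hv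
      have henc : encL l = encL (l.take (n - 4)) * 256 + encL (l.drop (n - 4)) := by
        conv_lhs => rw [hsplit]
        rw [encL_append, htl]; norm_num
      have ht0 : 0 ≤ encL (l.drop (n - 4)) := encL_nonneg hvt
      have ht1 : encL (l.drop (n - 4)) < 256 := by
        have := encL_lt hvt; rwa [htl] at this
      have hmod : PySem.Int.mod (encL l) 256 = encL (l.drop (n - 4)) := by
        rw [PySem.Int.mod_eq_emod_of_pos (by norm_num : (0:Int) < 256)]; omega
      have hdiv : PySem.Int.floordiv (encL l) 256 = encL (l.take (n - 4)) := by
        rw [PySem.Int.floordiv_eq_ediv_of_pos (by norm_num : (0:Int) < 256)]; omega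
      have hbyte : byteRCfn (encL (l.drop (n - 4))) = encL (rcl (l.drop (n - 4))) := by
        rw [byteRCfn_eq_crc4 ht0 ht1, crc4_enc4 hvt htl]
      rw [getRCgo]
      have hge : ((n : Int) ≥ 4) := by exact_mod_cast hn
      rw [if_pos hge, hmod, hdiv, hbyte]
      have hcast : ((n : Int) - 4) = ((n - 4 : Nat) : Int) := by omega
      rw [hcast, ih (n - 4) (by omega) _ hpl hvp]
      have hrcl : encL (rcl l) =
          encL (rcl (l.drop (n - 4))) * 4 ^ (n - 4) + encL (rcl (l.take (n - 4))) := by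
        conv_lhs => rw [hsplit]
        rw [rcl_append, encL_append, rcl_length, hpl]
      rw [hrcl]
      have hpow : (4 : Int) ^ n = 4 ^ (n - 4) * 256 := by
        have h4 : n = (n - 4) + 4 := by omega
        rw [h4]; rw [pow_add]; norm_num
      rw [hpow]; ring
    · interval_cases n
      · rcases List.length_eq_zero_iff.mp hl with rfl
        rw [getRCgo]; simp [encL, rcl]
      · rcases l with _ | ⟨c1, _ | ⟨c2, t⟩⟩ <;> simp_all
        have h1 := baseC_bounds (hv c1 (by simp))
        have e1 := baseC_comp (hv c1 (by simp))
        have hrc : rcl [c1] = [compC c1] := by simp [rcl]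
        rw [getRCgo, if_neg (by norm_num), if_pos (by norm_num), hrc]
        simp only [encL, List.foldl]
        rw [byteRCfn_eq_crc4 (by omega) (by omega)]
        norm_num
        simp only [show ((2:Int)).toNat = 2 from rfl, show ((6:Int)).toNat = 6 from rfl]
        norm_num
        simp only [crc4, e1]
        omega
      · rcases l with _ | ⟨c1, _ | ⟨c2, _ | ⟨c3, t⟩⟩⟩ <;> simp_all
        have h1 := baseC_bounds (hv c1 (by simp))
        have h2 := baseC_bounds (hv c2 (by simp))
        have e1 := baseC_comp (hv c1 (by simp))
        have e2 := baseC_comp (hv c2 (by simp))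
        have hrc : rcl [c1, c2] = [compC c2, compC c1] := by simp [rcl]
        rw [getRCgo, if_neg (by norm_num), if_pos (by norm_num), hrc]
        simp only [encL, List.foldl]
        rw [byteRCfn_eq_crc4 (by omega) (by omega)]
        norm_num
        simp only [show ((4:Int)).toNat = 4 from rfl]
        norm_num
        simp only [crc4, e1, e2]
        omega
      · rcases l with _ | ⟨c1, _ | ⟨c2, _ | ⟨c3, _ | ⟨c4, t⟩⟩⟩⟩ <;> simp_all
        have h1 := baseC_bounds (hv c1 (by simp))
        have h2 := baseC_bounds (hv c2 (by simp))
        have h3 := baseC_bounds (hv c3 (by simp))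
        have e1 := baseC_comp (hv c1 (by simp))
        have e2 := baseC_comp (hv c2 (by simp))
        have e3 := baseC_comp (hv c3 (by simp))
        have hrc : rcl [c1, c2, c3] = [compC c3, compC c2, compC c1] := by simp [rcl]
        rw [getRCgo, if_neg (by norm_num), if_pos (by norm_num), hrc]
        simp only [encL, List.foldl]
        rw [byteRCfn_eq_crc4 (by omega) (by omega)]
        norm_num
        simp only [show ((2:Int)).toNat = 2 from rfl, show ((6:Int)).toNat = 6 from rfl]
        norm_num
        simp only [crc4, e1, e2, e3]
        omega

theorem pre_validL {s : String} (h : Pre_string2CaKmer s) : validL s.toList := by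
  intro c hc
  have h2 := (List.all_eq_true.mp h) c hc
  simp only [Bool.or_eq_true, beq_iff_eq] at h2
  simp only [List.mem_cons, List.not_mem_nil, or_false]
  tauto

theorem compC_valid {c : Char} (h : c ∈ (['A','C','G','T'] : List Char)) :
    compC c ∈ (['A','C','G','T'] : List Char) := by
  simp only [List.mem_cons, List.not_mem_nil, or_false] at h ⊢
  rcases h with rfl | rfl | rfl | rfl <;> decide

theorem validL_rcl {l : List Char} (hv : validL l) : validL (rcl l) := by
  intro c hc
  simp only [rcl, List.mem_reverse, List.mem_map] at hc
  obtain ⟨d, hd, rfl⟩ := hc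
  exact compC_valid (hv d hd)

-- digit j of the reverse complement is 3 minus digit (length - j - 1)
theorem rcl_getD {l : List Char} (hv : validL l) {j : Nat} (hj : j < l.length) :
    baseC ((rcl l).getD j 'A') = 3 - baseC (l.getD (l.length - j - 1) 'A') := by
  have hj' : j < (rcl l).length := by rwa [rcl_length]
  have hj2 : l.length - j - 1 < l.length := by omega
  rw [List.getD_eq_getElem _ _ hj', List.getD_eq_getElem _ _ hj2]
  have h1 : (rcl l)[j]'hj' = compC (l[l.length - j - 1]'hj2) := by
    simp only [rcl, List.getElem_reverse, List.getElem_map, List.length_map]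
    simp only [show l.length - 1 - j = l.length - j - 1 from by omega]
  rw [h1, baseC_comp (hv _ (List.getElem_mem _))]

-- first differing base-4 digit decides the integer comparison
theorem encL_lt_of_lex : ∀ (xs ys : List Char), xs.length = ys.length → validL xs → validL ys →
    ∀ i : Nat, i < xs.length →
    (∀ j : Nat, j < i → baseC (xs.getD j 'A') = baseC (ys.getD j 'A')) →
    baseC (xs.getD i 'A') < baseC (ys.getD i 'A') → encL xs < encL ys := by
  intro xs
  induction xs with
  | nil => intro ys _ _ _ i hi; simp at hi
  | cons x xs ih =>
    intro ys hlen hvx hvy i hi hpre hlt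
    rcases ys with _ | ⟨y, ys⟩
    · simp at hlen
    have hlen' : xs.length = ys.length := by simpa using hlen
    have hvx' : validL xs := fun c hc => hvx c (List.mem_cons_of_mem _ hc)
    have hvy' : validL ys := fun c hc => hvy c (List.mem_cons_of_mem _ hc)
    have hP : (0:Int) < 4 ^ xs.length := by positivity
    rw [encL_cons, encL_cons, ← hlen']
    rcases i with _ | i
    · -- heads differ
      simp only [List.getD_cons_zero] at hlt
      have hex := encL_lt hvx'
      have hey := encL_nonneg hvy'
      calc baseC x * 4 ^ xs.length + encL xs
          < baseC x * 4 ^ xs.length + 4 ^ xs.length := by omega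
        _ = (baseC x + 1) * 4 ^ xs.length := by ring
        _ ≤ baseC y * 4 ^ xs.length := by
            apply mul_le_mul_of_nonneg_right (by omega) (by positivity)
        _ ≤ baseC y * 4 ^ xs.length + encL ys := by omega
    · -- heads equal, recurse on the tails
      have hhead : baseC x = baseC y := by
        have := hpre 0 (Nat.succ_pos _)
        simpa using this
      have htail : encL xs < encL ys := by
        apply ih ys hlen' hvx' hvy' i (by simpa using hi)
        · intro j hj
          have := hpre (j + 1) (by omega)
          simpa using this
        · simpa using hlt
      rw [hhead]
      omega

-- pointwise-equal digits give equal encodings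
theorem encL_eq_of_alleq : ∀ (xs ys : List Char), xs.length = ys.length →
    (∀ j : Nat, j < xs.length → baseC (xs.getD j 'A') = baseC (ys.getD j 'A')) →
    encL xs = encL ys := by
  intro xs
  induction xs with
  | nil =>
    intro ys hlen _
    rcases ys with _ | ⟨y, ys⟩
    · rfl
    · simp at hlen
  | cons x xs ih =>
    intro ys hlen hall
    rcases ys with _ | ⟨y, ys⟩
    · simp at hlen
    have hlen' : xs.length = ys.length := by simpa using hlen
    have hhead : baseC x = baseC y := by simpa using hall 0 (Nat.succ_pos _)
    have htail : encL xs = encL ys := by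
      apply ih ys hlen'
      intro j hj
      simpa using hall (j + 1) (by simp only [List.length_cons]; omega)
    rw [encL_cons, encL_cons, hlen', hhead, htail]

theorem caLoop_spec (l : List Char) (hv : validL l) : ∀ m i : Nat, l.length - i = m →
    i ≤ l.length →
    (∀ j : Nat, j < i → baseC (l.getD j 'A') = 3 - baseC (l.getD (l.length - j - 1) 'A')) →
    caLoop l l.length i =
      if encL l ≥ encL (rcl l) then encL l else getRCkmer (encL l) (l.length : Int) := by
  intro m
  induction m with
  | zero =>
    intro i hm hle hpre
    have hik : i = l.length := by omega
    rw [caLoop, if_neg (by omega)]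
    have heq : encL l = encL (rcl l) := by
      apply encL_eq_of_alleq l (rcl l) (rcl_length l).symm
      intro j hj
      rw [rcl_getD hv hj]
      exact hpre j (by omega)
    rw [if_pos (by omega)]
  | succ m ihm =>
    intro i hm hle hpre
    have hik : i < l.length := by omega
    have hik2 : l.length - i - 1 < l.length := by omega
    rw [caLoop, if_pos hik]
    by_cases hgt : baseC (l.getD i 'A') > 3 - baseC (l.getD (l.length - i - 1) 'A')
    · rw [if_pos hgt]
      have hlt : encL (rcl l) < encL l := by
        apply encL_lt_of_lex (rcl l) l (rcl_length l) (validL_rcl hv) hv i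
          (by rw [rcl_length]; exact hik)
        · intro j hj
          rw [rcl_getD hv (by omega)]
          rw [hpre j hj]
        · rw [rcl_getD hv hik]
          omega
      rw [if_pos (by omega)]
    · rw [if_neg hgt]
      by_cases hlt : baseC (l.getD i 'A') < 3 - baseC (l.getD (l.length - i - 1) 'A')
      · rw [if_pos hlt]
        have hlt2 : encL l < encL (rcl l) := by
          apply encL_lt_of_lex l (rcl l) (rcl_length l).symm hv (validL_rcl hv) i hik
          · intro j hj
            rw [rcl_getD hv (by omega)]
            rw [hpre j hj]
          · rw [rcl_getD hv hik]
            omega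
        rw [if_neg (by omega)]
      · rw [if_neg hlt]
        apply ihm (i + 1) (by omega) (by omega)
        intro j hj
        rcases Nat.lt_or_ge j i with hji | hji
        · exact hpre j hji
        · have hji' : j = i := by omega
          subst hji'
          omega

-- B's loop invariant: f accumulates MSB-first, r accumulates the rc encoding shifted by 2^sh
theorem altGo_spec : ∀ (l : List Char), validL l → ∀ (f r sh : Int), 0 ≤ sh →
    altGo l f r sh = (f * 4 ^ l.length + encL l, r + encL (rcl l) * 2 ^ sh.toNat) := by
  intro l
  induction l with
  | nil => intro _ f r sh _; simp [altGo, encL, rcl]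
  | cons c t ih =>
    intro hv f r sh hsh
    have hc : c ∈ (['A','C','G','T'] : List Char) := hv c (List.mem_cons_self ..)
    have hvt : validL t := fun x hx => hv x (List.mem_cons_of_mem _ hx)
    rw [altGo, baseB_eq_baseC hc, ih hvt _ _ _ (by omega)]
    have hrc : encL (rcl (c :: t)) = encL (rcl t) * 4 + (3 - baseC c) := by
      have : rcl (c :: t) = rcl t ++ [compC c] := by simp [rcl]
      rw [this, encL_append]
      simp [encL, baseC_comp hc]
    have hpowsh : ((sh + 2).toNat : Nat) = sh.toNat + 2 := by omega
    refine Prod.ext ?_ ?_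
    · simp only [encL_cons c t, List.length_cons]
      ring
    · simp only [hrc, hpowsh, pow_add]
      ring

-- ===== VERDICT (by name: the statement is the Claim_ definition above) =====
theorem string2CaKmer_spec : Claim_equal_string2CaKmer := by
  intro s _ hpre
  unfold Spec_string2CaKmer string2CaKmer string2CaKmer_alt
  have hv : validL s.toList := pre_validL hpre
  have hrc : getRCkmer (encL s.toList) (s.toList.length : Int) = encL (rcl s.toList) := by
    unfold getRCkmer
    simpa using getRCgo_spec s.toList.length s.toList rfl hv 0
  have halt : altGo s.toList 0 0 0 = (encL s.toList, encL (rcl s.toList)) := by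
    simpa using altGo_spec s.toList hv 0 0 0 le_rfl
  rw [caLoop_spec s.toList hv (s.toList.length - 0) 0 rfl (Nat.zero_le _) (by omega), halt, hrc]
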